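-- pv_equiv track=rewrite | github.com/nefastosaturo/DeepSpeech-Italian-Model | MITADS/utils/sanitize.py | get_roman_numbers
-- ===== SOURCE A (Python) =====
-- def get_roman_numbers(ch):
--   ROMAN_CHARS = "XVI"
--   ro  = ''
--   ros = 0
--   for i in range(len(ch)):
--     c = ch[i]
--     if c in ROMAN_CHARS:
--       if len(ro) == 0 and not ch[i-1].isalpha():
--         ro  = c
--         ros = i
--       else:
--         if len(ro) > 0 and ch[i-1] in ROMAN_CHARS:
--           ro += c
--     else:
--       if len(ro) > 0:
--         if not c.isalpha():
--           yield ch[ros-1], ch[i], ro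
--         ro  = ''
--         ros = i
--
--   if len(ro) > 0:
--     yield ch[ros-1], '', ro
-- ===== SOURCE B (Python) =====
-- def get_roman_numbers(ch):
--   n = len(ch)
--   i = 0
--   while i < n:
--     if ch[i] in "XVI":
--       s = i
--       while i < n and ch[i] in "XVI":
--         i += 1
--       if not ch[s-1].isalpha():
--         if i == n:
--           yield ch[s-1], '', ch[s:i]
--         elif not ch[i].isalpha():
--           yield ch[s-1], ch[i], ch[s:i]
--     else:
--       i += 1
-- ===== Notes on version B (the rewrite author's own statement) =====
-- stated objective: alternative
-- what changed: A's per-character state machine (ro/ros accumulator with start/extend/flush transitions) is replaced by a run-based scanner: an outer loop jumps from one maximal [XVI]-run to the next, an inner scan finds the run's end, and the context gate and yield are decided once per run from its boundaries.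
import Mathlib
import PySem

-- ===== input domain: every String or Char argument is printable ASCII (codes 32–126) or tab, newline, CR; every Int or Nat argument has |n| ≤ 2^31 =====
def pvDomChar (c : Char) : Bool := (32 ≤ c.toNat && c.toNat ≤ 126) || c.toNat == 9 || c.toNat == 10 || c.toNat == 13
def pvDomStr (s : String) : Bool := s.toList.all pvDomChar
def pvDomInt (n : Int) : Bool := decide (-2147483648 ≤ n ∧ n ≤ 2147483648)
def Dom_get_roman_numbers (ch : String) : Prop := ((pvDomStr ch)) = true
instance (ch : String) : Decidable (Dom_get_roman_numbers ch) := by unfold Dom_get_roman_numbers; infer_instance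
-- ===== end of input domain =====

-- B replaces A's per-character accumulator state machine by a run-based scanner
-- (jump from one maximal [XVI]-run to the next, gate and yield once per run);
-- same asymptotic cost, alternative structure.

-- ===== PORT A =====
-- shared vocabulary of both sources: membership in "XVI", and Python's ch[k-1]
-- (negative index wraps; always in range here since the string is nonempty when read)
def pvRoman (c : Char) : Bool := c == 'X' || c == 'V' || c == 'I'
def pvPrev (cs : List Char) (i : Nat) : Char := PySem.List.pyGetD cs ((i : Int) - 1) ' '

-- the for-loop of A: state (ro, ros), yields collected in order
def pvLoopA (cs : List Char) (i : Nat) (ro : List Char) (ros : Nat) :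
    List (String × String × String) :=
  if h : i < cs.length then
    if pvRoman cs[i] = true then
      if ro.length = 0 ∧ PySem.Chars.isalpha (pvPrev cs i) = false then
        pvLoopA cs (i + 1) [cs[i]] i
      else
        if 0 < ro.length ∧ pvRoman (pvPrev cs i) = true then
          pvLoopA cs (i + 1) (ro ++ [cs[i]]) ros
        else
          pvLoopA cs (i + 1) ro ros
    else
      if 0 < ro.length then
        (if PySem.Chars.isalpha cs[i] = false then
           [(String.mk [pvPrev cs ros], String.mk [cs[i]], String.mk ro)]
         else []) ++ pvLoopA cs (i + 1) [] i
      else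
        pvLoopA cs (i + 1) ro ros
  else
    if 0 < ro.length then [(String.mk [pvPrev cs ros], "", String.mk ro)] else []
termination_by cs.length - i
decreasing_by all_goals omega

def get_roman_numbers (ch : String) : List (String × String × String) :=
  pvLoopA ch.toList 0 [] 0

-- ===== PORT B =====
-- the inner while-loop of B: advance past the maximal roman run starting at i
def pvScan (cs : List Char) (i : Nat) : Nat :=
  if h : i < cs.length then
    if pvRoman cs[i] = true then pvScan cs (i + 1) else i
  else i
termination_by cs.length - i
decreasing_by omega

theorem pvScan_ge (cs : List Char) (i : Nat) : i ≤ pvScan cs i := by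
  rw [pvScan]
  split
  · split
    · have := pvScan_ge cs (i + 1); omega
    · exact le_refl i
  · exact le_refl i
termination_by cs.length - i
decreasing_by omega

theorem pvScan_gt (cs : List Char) (i : Nat) (h : i < cs.length)
    (hr : pvRoman cs[i] = true) : i < pvScan cs i := by
  rw [pvScan, dif_pos h, if_pos hr]
  have := pvScan_ge cs (i + 1); omega

-- the outer while-loop of B
def pvLoopB (cs : List Char) (i : Nat) : List (String × String × String) :=
  if h : i < cs.length then
    if hr : pvRoman cs[i] = true then
      (if PySem.Chars.isalpha (pvPrev cs i) = false then
         (if pvScan cs i = cs.length then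
            [(String.mk [pvPrev cs i], "",
              String.mk (PySem.List.slice cs (some (i : Int)) (some (pvScan cs i : Int))))]
          else if PySem.Chars.isalpha (cs.getD (pvScan cs i) ' ') = false then
            [(String.mk [pvPrev cs i], String.mk [cs.getD (pvScan cs i) ' '],
              String.mk (PySem.List.slice cs (some (i : Int)) (some (pvScan cs i : Int))))]
          else [])
       else []) ++ pvLoopB cs (pvScan cs i)
    else
      pvLoopB cs (i + 1)
  else []
termination_by cs.length - i
decreasing_by
  · have := pvScan_gt cs i h hr; omega
  · omega

def get_roman_numbers_alt (ch : String) : List (String × String × String) :=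
  pvLoopB ch.toList 0

-- ===== PRECONDITION & SPEC =====
def Spec_get_roman_numbers (ch : String) (out : List (String × String × String)) : Prop := out = get_roman_numbers_alt ch
instance (ch : String) (out : List (String × String × String)) : Decidable (Spec_get_roman_numbers ch out) := by unfold Spec_get_roman_numbers; infer_instance

-- ===== CLAIM (what is proved, stated in full; the proofs are below) =====
def Claim_equal_get_roman_numbers : Prop := ∀ (ch : String), Dom_get_roman_numbers ch → Spec_get_roman_numbers ch (get_roman_numbers ch)

-- ===== LEMMAS AND PROOFS =====

theorem pvScan_le (cs : List Char) (i : Nat) (h : i ≤ cs.length) :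
    pvScan cs i ≤ cs.length := by
  rw [pvScan]
  split
  · split
    · exact pvScan_le cs (i + 1) (by omega)
    · omega
  · omega
termination_by cs.length - i
decreasing_by omega

theorem roman_alpha {c : Char} (h : pvRoman c = true) :
    PySem.Chars.isalpha c = true := by
  unfold pvRoman at h
  simp only [Bool.or_eq_true, beq_iff_eq] at h
  rcases h with (h | h) | h <;> subst h <;> decide

theorem pvPrev_pos (cs : List Char) (i : Nat) (h1 : 1 ≤ i) :
    pvPrev cs i = cs.getD (i - 1) ' ' := by
  unfold pvPrev
  have : (i : Int) - 1 = ((i - 1 : Nat) : Int) := by omega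
  rw [this, PySem.List.pyGetD_natCast]

theorem pvScan_of_ge (cs : List Char) (i : Nat) (h : cs.length ≤ i) :
    pvScan cs i = i := by
  rw [pvScan, dif_neg (by omega)]

theorem pvScan_of_not_roman (cs : List Char) (i : Nat) (h : i < cs.length)
    (hr : pvRoman cs[i] = false) : pvScan cs i = i := by
  rw [pvScan, dif_pos h, if_neg (by simp [hr])]

theorem pvScan_step (cs : List Char) (i : Nat) (h : i < cs.length)
    (hr : pvRoman cs[i] = true) : pvScan cs i = pvScan cs (i + 1) := by
  rw [pvScan, dif_pos h, if_pos hr]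

theorem pvScan_stop (cs : List Char) (i : Nat) (h : pvScan cs i < cs.length) :
    pvRoman (cs.getD (pvScan cs i) ' ') = false := by
  by_cases hi : i < cs.length
  · by_cases hr : pvRoman cs[i] = true
    · rw [pvScan_step cs i hi hr] at h ⊢
      exact pvScan_stop cs (i + 1) h
    · rw [pvScan_of_not_roman cs i hi (by simpa using hr)] at h ⊢
      rw [List.getD_eq_getElem cs ' ' hi]
      simpa using hr
  · rw [pvScan_of_ge cs i (by omega)] at h; omega
termination_by cs.length - i
decreasing_by omega

theorem run_snoc (cs : List Char) (s i : Nat) (_hs : s ≤ i) (hi : i < cs.length) :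
    (cs.drop s).take (i - s) ++ [cs[i]] = (cs.drop s).take (i + 1 - s) := by
  have h1 : i + 1 - s = (i - s) + 1 := by omega
  rw [h1, List.take_succ]
  have h2 : (cs.drop s)[i - s]? = some cs[i] := by
    rw [List.getElem?_drop]
    have hsi : s + (i - s) = i := by omega
    rw [hsi, List.getElem?_eq_getElem hi]
  rw [h2]
  rfl

theorem run_len (cs : List Char) (s i : Nat) (_hs : s < i) (hi : i ≤ cs.length) :
    ((cs.drop s).take (i - s)).length = i - s := by
  simp [List.length_take, List.length_drop]; omega

-- the pending output of a run that started at s, given its end j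
def pvTail (cs : List Char) (s j : Nat) : List (String × String × String) :=
  if j = cs.length then
    [(String.mk [pvPrev cs s], "", String.mk ((cs.drop s).take (j - s)))]
  else if PySem.Chars.isalpha (cs.getD j ' ') = false then
    [(String.mk [pvPrev cs s], String.mk [cs.getD j ' '],
      String.mk ((cs.drop s).take (j - s)))]
  else []

-- A, entered mid-run at i with ro = cs[s:i], flushes the run at its end and continues
theorem runA (cs : List Char) (i s : Nat) (hsi : s < i) (hin : i ≤ cs.length)
    (hrun : ∀ k, s ≤ k → k < i → pvRoman (cs.getD k ' ') = true) :
    pvLoopA cs i ((cs.drop s).take (i - s)) s =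
      pvTail cs s (pvScan cs i) ++
        (if pvScan cs i = cs.length then [] else pvLoopA cs (pvScan cs i + 1) [] (pvScan cs i)) := by
  have hlen := run_len cs s i hsi hin
  by_cases h : i < cs.length
  · rw [pvLoopA, dif_pos h]
    by_cases hr : pvRoman cs[i] = true
    · -- roman: extend the run
      rw [if_pos hr, if_neg (fun hc => by omega),
          if_pos ⟨by omega, by
            rw [pvPrev_pos cs i (by omega)]
            exact hrun (i - 1) (by omega) (by omega)⟩,
          run_snoc cs s i (by omega) h,
          runA cs (i + 1) s (by omega) (by omega)
            (fun k hk1 hk2 => by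
              by_cases hk : k < i
              · exact hrun k hk1 hk
              · have : k = i := by omega
                subst this
                rw [List.getD_eq_getElem cs ' ' h]
                exact hr),
          pvScan_step cs i h hr]
    · -- non-roman: flush here
      have hsc : pvScan cs i = i := pvScan_of_not_roman cs i h (by simpa using hr)
      rw [if_neg hr, if_pos (by omega), hsc]
      unfold pvTail
      rw [if_neg (show ¬ i = cs.length by omega), if_neg (show ¬ i = cs.length by omega),
          List.getD_eq_getElem cs ' ' h]
  · -- end of string: final yield
    have hieq : i = cs.length := by omega
    have hsc : pvScan cs i = i := pvScan_of_ge cs i (by omega)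
    rw [pvLoopA, dif_neg h, if_pos (by omega), hsc]
    unfold pvTail
    rw [if_pos hieq, if_pos hieq]
    simp

-- B skips a run whose left context is alphabetic
theorem loopB_blocked (cs : List Char) (i : Nat)
    (hprev : PySem.Chars.isalpha (pvPrev cs i) = true) :
    pvLoopB cs i = pvLoopB cs (pvScan cs i) := by
  by_cases h : i < cs.length
  · by_cases hr : pvRoman cs[i] = true
    · rw [pvLoopB, dif_pos h, dif_pos hr]
      simp [hprev]
    · rw [pvScan_of_not_roman cs i h (by simpa using hr)]
  · rw [pvScan_of_ge cs i (by omega)]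

-- main invariant: with an empty accumulator, A from i behaves like B from i
theorem mainA (cs : List Char) (i : Nat) (ros : Nat) (hin : i ≤ cs.length) :
    pvLoopA cs i [] ros = pvLoopB cs i := by
  by_cases h : i < cs.length
  · by_cases hr : pvRoman cs[i] = true
    · by_cases hp : PySem.Chars.isalpha (pvPrev cs i) = false
      · -- an admissible run starts at i
        have h1 : (cs.drop i).take (i + 1 - i) = [cs[i]] := by
          have he : i + 1 - i = 1 := by omega
          rw [he, List.take_one, List.head?_drop, List.getElem?_eq_getElem h]
          rfl
        rw [pvLoopA, dif_pos h, if_pos hr, if_pos ⟨rfl, hp⟩, ← h1,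
            runA cs (i + 1) i (by omega) (by omega)
              (fun k hk1 hk2 => by
                have : k = i := by omega
                subst this
                rw [List.getD_eq_getElem cs ' ' h]
                exact hr),
            ← pvScan_step cs i h hr,
            pvLoopB, dif_pos h, dif_pos hr, if_pos hp]
        unfold pvTail
        simp only [PySem.List.slice_natCast]
        congr 1
        by_cases hj : pvScan cs i = cs.length
        · rw [if_pos hj, pvLoopB, dif_neg (by omega)]
        · have hge := pvScan_ge cs i
          have hjl : pvScan cs i < cs.length :=
            lt_of_le_of_ne (pvScan_le cs i (by omega)) hj
          have hnr := pvScan_stop cs i hjl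
          have e : pvLoopB cs (pvScan cs i) = pvLoopB cs (pvScan cs i + 1) := by
            rw [pvLoopB, dif_pos hjl, dif_neg (by
              rw [List.getD_eq_getElem cs ' ' hjl] at hnr
              simp [hnr])]
          rw [if_neg hj, e]
          exact mainA cs (pvScan cs i + 1) (pvScan cs i) (by omega)
      · -- run start blocked by an alphabetic left neighbour
        have hp' : PySem.Chars.isalpha (pvPrev cs i) = true := by
          revert hp; cases PySem.Chars.isalpha (pvPrev cs i) <;> simp
        rw [pvLoopA, dif_pos h, if_pos hr, if_neg (fun hc => hp hc.2),
            if_neg (by simp), mainA cs (i + 1) ros (by omega),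
            loopB_blocked cs i hp',
            loopB_blocked cs (i + 1) (by
              rw [pvPrev_pos cs (i + 1) (by omega)]
              have : i + 1 - 1 = i := by omega
              rw [this, List.getD_eq_getElem cs ' ' h]
              exact roman_alpha hr),
            pvScan_step cs i h hr]
    · -- not a roman character
      have e : pvLoopB cs i = pvLoopB cs (i + 1) := by
        rw [pvLoopB, dif_pos h, dif_neg hr]
      rw [pvLoopA, dif_pos h, if_neg hr, if_neg (by simp),
          mainA cs (i + 1) ros (by omega), e]
  · -- end of string, nothing pending
    rw [pvLoopA, dif_neg h, if_neg (by simp), pvLoopB, dif_neg h]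
termination_by cs.length - i
decreasing_by all_goals omega

-- ===== VERDICT (by name: the statement is the Claim_ definition above) =====
theorem get_roman_numbers_spec : Claim_equal_get_roman_numbers := by
  intro ch _
  unfold Spec_get_roman_numbers get_roman_numbers get_roman_numbers_alt
  exact mainA ch.toList 0 0 (by omega)
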